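-- pv_equiv track=rewrite | github.com/rahulmaheshwari02/openbmc-test-automation | syslib/utils_keywords.py | htx_error_log_to_list
-- ===== SOURCE A (Python) =====
-- def htx_error_log_to_list(htx_error_log_output):
--
--     r"""
--     Parse htx error log output string and return list of strings in the form
--     "<field name>:<field value>".
--     The output of this function may be passed to the build_error_dict function.
--
--     Description of argument(s):
--     htx_error_log_output        Error entry string containing the stdout
--                                 generated by "htxcmdline -geterrlog".
--
--     Example of htx_error_log_output contents:
--
--     ######################## Result Starts Here ###############################
--     Currently running ECG/MDT : /usr/lpp/htx/mdt/mdt.whit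
--     ===========================
--     ---------------------------------------------------------------------
--     Device id:/dev/nvidia0
--     Timestamp:Mar 29 19:41:54 2017
--     err=00000027
--     sev=1
--     Exerciser Name:hxenvidia
--     Serial No:Not Available
--     Part No:Not Available
--     Location:Not Available
--     FRU Number:Not Available
--     Device:Not Available
--     Error Text:cudaEventSynchronize for stopEvent returned err = 0039 from file
--                , line 430.
--     ---------------------------------------------------------------------
--     ---------------------------------------------------------------------
--     Device id:/dev/nvidia0
--     Timestamp:Mar 29 19:41:54 2017
--     err=00000027
--     sev=1
--     Exerciser Name:hxenvidia
--     Serial No:Not Available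
--     Part No:Not Available
--     Location:Not Available
--     FRU Number:Not Available
--     Device:Not Available
--     Error Text:Hardware Exerciser stopped on error
--     ---------------------------------------------------------------------
--     ######################### Result Ends Here ################################
--
--     Example output:
--     Returns the lists of error string per entry
--     ['Device id:/dev/nvidia0',
--      'Timestamp:Mar 29 19:41:54 2017',
--      'err=00000027',
--      'sev=1',
--      'Exerciser Name:hxenvidia',
--      'Serial No:Not Available',
--      'Part No:Not Available',
--      'Location:Not Available',
--      'FRU Number:Not Available',
--      'Device:Not Available',
--      'Error Text:cudaEventSynchronize for stopEvent returned err = 0039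
--                  from file , line 430.']
--     """
--
--     # List which will hold all the list of entries.
--     error_list = []
--
--     temp_error_list = []
--     parse_walk = False
--
--     for line in htx_error_log_output.splitlines():
--         # Skip lines starting with "#"
--         if line.startswith("#"):
--             continue
--
--         # Mark line starting with "-" and set parse flag.
--         if line.startswith("-") and parse_walk is False:
--             parse_walk = True
--             continue
--         # Mark line starting with "-" and reset parse flag.
--         # Set temp error list to EMPTY.
--         elif line.startswith("-"):
--             error_list.append(temp_error_list)
--             parse_walk = False
--             temp_error_list = []
--         # Add entry to list if line is not emtpy
--         elif parse_walk:
--             temp_error_list.append(str(line))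
--
--     return error_list
-- ===== SOURCE B (Python) =====
-- def htx_error_log_to_list(htx_error_log_output):
--     # Drop comment lines, then split the remainder into dash-bounded segments;
--     # the captured entries are the segments at odd positions among the closed ones.
--     lines = [l for l in htx_error_log_output.splitlines() if not l.startswith("#")]
--     segments = [[]]
--     for line in lines:
--         if line.startswith("-"):
--             segments.append([])
--         else:
--             segments[-1].append(line)
--     return [seg for i, seg in enumerate(segments[:-1]) if i % 2 == 1]
-- ===== Notes on version B (the rewrite author's own statement) =====
-- stated objective: alternative
-- what changed: Replaces A's single pass with a boolean parse_walk toggle and mid-stream temp buffer by a two-phase decomposition: filter out comment lines, split the rest into dash-bounded segments, then select the odd-position closed segments.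
import Mathlib
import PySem

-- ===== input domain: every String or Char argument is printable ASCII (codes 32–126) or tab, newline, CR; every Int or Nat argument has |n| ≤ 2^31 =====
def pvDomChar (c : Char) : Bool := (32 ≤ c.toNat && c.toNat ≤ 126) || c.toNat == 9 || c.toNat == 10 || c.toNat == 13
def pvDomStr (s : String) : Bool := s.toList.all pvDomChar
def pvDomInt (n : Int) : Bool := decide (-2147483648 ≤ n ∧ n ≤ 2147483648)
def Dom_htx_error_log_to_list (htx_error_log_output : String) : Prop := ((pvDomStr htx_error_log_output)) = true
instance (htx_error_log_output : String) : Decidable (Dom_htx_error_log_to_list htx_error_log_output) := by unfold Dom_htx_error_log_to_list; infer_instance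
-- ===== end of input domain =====

-- B rebuilds the result in two phases (drop comment lines, split into dash-bounded segments, then pick
-- the odd-position closed segments) instead of A's one-pass boolean-toggle accumulator; objective:
-- alternative decomposition, same cost.


-- ===== PORT A =====
-- A's loop body: skip '#' lines; a '-' line toggles parse_walk (appending temp when it closes a
-- region and resetting it); any other line is appended to temp while parse_walk is set.
def pvAStep (st : List (List String) × List String × Bool) (line : String) :
    List (List String) × List String × Bool :=
  if PySem.Str.startswith line "#" then st
  else if PySem.Str.startswith line "-" && !st.2.2 then (st.1, st.2.1, true)
  else if PySem.Str.startswith line "-" then (st.1 ++ [st.2.1], [], false)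
  else if st.2.2 then (st.1, st.2.1 ++ [line], st.2.2)
  else st

def htx_error_log_to_list (htx_error_log_output : String) : List (List String) :=
  ((PySem.Str.splitlines htx_error_log_output).foldl pvAStep ([], [], false)).1

-- ===== PORT B =====
-- B's loop body: a '-' line starts a new segment, any other line extends the current (last) segment.
def pvBStep (segs : List (List String)) (line : String) : List (List String) :=
  if PySem.Str.startswith line "-" then segs ++ [[]]
  else segs.dropLast ++ [segs.getLastD [] ++ [line]]

def htx_error_log_to_list_alt (htx_error_log_output : String) : List (List String) :=
  let lines := (PySem.Str.splitlines htx_error_log_output).filter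
    (fun l => !PySem.Str.startswith l "#")
  let segments := lines.foldl pvBStep [[]]
  ((PySem.List.enumerate (PySem.List.slice segments none (some (-1)))).filter
      (fun p => PySem.Int.mod p.1 2 == 1)).map (·.2)

-- ===== PRECONDITION & SPEC =====
def Spec_htx_error_log_to_list (htx_error_log_output : String) (out : List (List String)) : Prop := out = htx_error_log_to_list_alt htx_error_log_output
instance (htx_error_log_output : String) (out : List (List String)) : Decidable (Spec_htx_error_log_to_list htx_error_log_output out) := by unfold Spec_htx_error_log_to_list; infer_instance

-- ===== CLAIM (what is proved, stated in full; the proofs are below) =====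
def Claim_equal_htx_error_log_to_list : Prop := ∀ (htx_error_log_output : String), Dom_htx_error_log_to_list htx_error_log_output → Spec_htx_error_log_to_list htx_error_log_output (htx_error_log_to_list htx_error_log_output)

-- ===== LEMMAS AND PROOFS =====

-- elements at odd positions
def pvOdds {α : Type} : List α → List α
  | _ :: b :: t => b :: pvOdds t
  | _ => []

-- elements at even positions
def pvEvens {α : Type} : List α → List α
  | a :: t => a :: pvOdds t
  | [] => []

theorem pvOdds_concat {α : Type} : ∀ (xs : List α) (x : α),
    pvOdds (xs ++ [x]) = if xs.length % 2 = 1 then pvOdds xs ++ [x] else pvOdds xs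
  | [], x => by simp [pvOdds]
  | [a], x => by simp [pvOdds]
  | a :: b :: t, x => by
      simp only [List.cons_append, pvOdds, pvOdds_concat t x, List.length_cons]
      split_ifs with h1 h2
      · simp
      · omega
      · omega
      · rfl
def pvInv (segs : List (List String)) : List (List String) × List String × Bool :=
  (pvOdds segs.dropLast,
   if segs.length % 2 = 0 then segs.getLastD [] else [],
   decide (segs.length % 2 = 0))
theorem pvStep_comm (segs : List (List String)) (hne : segs ≠ []) (w : String)
    (hw : PySem.Str.startswith w "#" = false) :
    pvAStep (pvInv segs) w = pvInv (pvBStep segs w) := by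
  have hpos : 0 < segs.length := List.length_pos_iff.mpr hne
  have hsplit : segs.dropLast ++ [segs.getLast hne] = segs := List.dropLast_append_getLast hne
  have hgl : segs.getLastD [] = segs.getLast hne := by
    simp [List.getLastD_eq_getLast?, List.getLast?_eq_getLast_of_ne_nil hne]
  have hodds := pvOdds_concat segs.dropLast (segs.getLast hne)
  rw [hsplit] at hodds
  have hdll : segs.dropLast.length = segs.length - 1 := by simp
  have hwc : PySem.Chars.startswith w.toList ['#'] = false := by simpa using hw
  by_cases hd : PySem.Str.startswith w "-" = true
  · have hdc : PySem.Chars.startswith w.toList ['-'] = true := by simpa using hd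
    have hBeq : pvBStep segs w = segs ++ [[]] := by simp [pvBStep, hdc]
    have hlenB : (segs ++ [[]]).length = segs.length + 1 := by simp
    by_cases hp : segs.length % 2 = 0
    · -- closing dash (parse_walk was true)
      have hL : pvAStep (pvInv segs) w = (pvOdds segs.dropLast ++ [segs.getLastD []], [], false) := by
        simp [pvAStep, pvInv, hwc, hdc, hp]
      rw [hL, hBeq]
      simp only [pvInv, List.dropLast_concat, hlenB]
      rw [if_neg (by omega), hodds, if_pos (by omega), hgl]
      simp [Prod.mk.injEq]; omega
    · -- opening dash (parse_walk was false)
      have hL : pvAStep (pvInv segs) w = (pvOdds segs.dropLast, [], true) := by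
        simp [pvAStep, pvInv, hwc, hdc, hp]
      rw [hL, hBeq]
      simp only [pvInv, List.dropLast_concat, hlenB]
      rw [if_pos (by omega), hodds, if_neg (by omega), List.getLastD_concat]
      simp [Prod.mk.injEq]; omega
  · have hdc : PySem.Chars.startswith w.toList ['-'] = false := by
      simpa using hd
    have hBeq : pvBStep segs w = segs.dropLast ++ [segs.getLastD [] ++ [w]] := by
      simp [pvBStep, hdc]
    have hlenB : (segs.dropLast ++ [segs.getLastD [] ++ [w]]).length = segs.length := by
      simp only [List.length_append, List.length_cons, List.length_nil, hdll]; omega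
    by_cases hp : segs.length % 2 = 0
    · have hL : pvAStep (pvInv segs) w = (pvOdds segs.dropLast, segs.getLastD [] ++ [w], true) := by
        simp [pvAStep, pvInv, hwc, hdc, hp]
      rw [hL, hBeq]
      simp only [pvInv, List.dropLast_concat, List.getLastD_concat, hlenB, hp, if_pos]
      simp
    · have hL : pvAStep (pvInv segs) w = (pvOdds segs.dropLast, [], false) := by
        simp [pvAStep, pvInv, hwc, hdc, hp]
      rw [hL, hBeq]
      simp only [pvInv, List.dropLast_concat, List.getLastD_concat, hlenB]
      simp [hp]
theorem pvOdds_cons {α : Type} (x : α) (t : List α) : pvOdds (x :: t) = pvEvens t := by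
  cases t <;> simp [pvOdds, pvEvens]

theorem pvBStep_ne_nil (segs : List (List String)) (w : String) : pvBStep segs w ≠ [] := by
  unfold pvBStep; split <;> simp

theorem pvLoop (ws : List String) (hw : ∀ l ∈ ws, PySem.Str.startswith l "#" = false)
    (segs : List (List String)) (hne : segs ≠ []) :
    ws.foldl pvAStep (pvInv segs) = pvInv (ws.foldl pvBStep segs) := by
  induction ws generalizing segs with
  | nil => rfl
  | cons w ws ih =>
      simp only [List.foldl_cons]
      rw [pvStep_comm segs hne w (hw w (by simp))]
      exact ih (fun l hl => hw l (by simp [hl])) _ (pvBStep_ne_nil segs w)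

theorem pvFoldA_filter (ls : List String) (st : List (List String) × List String × Bool) :
    ls.foldl pvAStep st = (ls.filter (fun l => !PySem.Str.startswith l "#")).foldl pvAStep st := by
  induction ls generalizing st with
  | nil => rfl
  | cons l ls ih =>
      rw [List.foldl_cons, List.filter_cons]
      cases h : PySem.Str.startswith l "#" with
      | true =>
          have hA : pvAStep st l = st := by
            have hc : PySem.Chars.startswith l.toList ['#'] = true := by simpa using h
            simp [pvAStep, hc]
          rw [hA]
          simpa using ih st
      | false =>
          simp only [Bool.not_false, if_pos, List.foldl_cons]
          exact ih (pvAStep st l)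

theorem pvSelect {α : Type} (xs : List α) (s : Int) (h : 0 ≤ s) :
    ((PySem.List.enumerate xs s).filter (fun p => PySem.Int.mod p.1 2 == 1)).map (·.2)
      = if s % 2 = 1 then pvEvens xs else pvOdds xs := by
  induction xs generalizing s with
  | nil => simp [PySem.List.enumerate_nil, pvEvens, pvOdds]
  | cons x t ih =>
      rw [PySem.List.enumerate_cons, List.filter_cons]
      have hm : PySem.Int.mod s 2 = s % 2 := PySem.Int.mod_eq_emod_of_pos (by norm_num)
      by_cases hp : s % 2 = 1
      · have hb : (PySem.Int.mod s 2 == 1) = true := by rw [hm, hp]; rfl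
        simp only [hb, if_pos, List.map_cons, ih (s + 1) (by omega), hp, if_pos]
        rw [if_neg (by omega)]
        simp [pvEvens]
      · have hb : (PySem.Int.mod s 2 == 1) = false := by rw [hm]; simp; omega
        simp only [hb, Bool.false_eq_true, if_false, ih (s + 1) (by omega)]
        rw [if_neg hp, if_pos (by omega), pvOdds_cons]


-- ===== VERDICT (by name: the statement is the Claim_ definition above) =====
theorem htx_error_log_to_list_spec : Claim_equal_htx_error_log_to_list := by
  intro s _
  unfold Spec_htx_error_log_to_list htx_error_log_to_list htx_error_log_to_list_alt
  have hInit : (([], [], false) : List (List String) × List String × Bool) = pvInv [[]] := by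
    simp [pvInv, pvOdds]
  rw [pvFoldA_filter, hInit,
    pvLoop _ (fun l hl => by
      have := (List.mem_filter.mp hl).2
      simpa using this) [[]] (by simp)]
  rw [pvSelect _ 0 le_rfl, if_neg (by omega), PySem.List.slice_to_neg_one]
  rfl
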